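-- pv_equiv track=rewrite | github.com/seife/RaspyRFM | apps/rcprotocols.py | __encode_byte
-- ===== SOURCE A (Python) =====
-- def __encode_byte(b):
-- 	b &= 0xFF
-- 	result = '{:08b}'.format(b)
-- 	par = 0
-- 	while b:
-- 		par ^= 1
-- 		b &= b-1
-- 	result += '1' if par != 0 else '0'
-- 	return result
-- ===== SOURCE B (Python) =====
-- def __encode_byte(b):
-- 	s = '{:08b}'.format(b & 0xFF)
-- 	par = s.count('1') & 1
-- 	return s + ('1' if par else '0')
-- ===== Notes on version B (the rewrite author's own statement) =====
-- stated objective: idiomatic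
-- what changed: Replaces A's Kernighan bit-clearing while-loop for parity with counting the '1' characters of the already-formatted binary string and taking the count's low bit.
import Mathlib
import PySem

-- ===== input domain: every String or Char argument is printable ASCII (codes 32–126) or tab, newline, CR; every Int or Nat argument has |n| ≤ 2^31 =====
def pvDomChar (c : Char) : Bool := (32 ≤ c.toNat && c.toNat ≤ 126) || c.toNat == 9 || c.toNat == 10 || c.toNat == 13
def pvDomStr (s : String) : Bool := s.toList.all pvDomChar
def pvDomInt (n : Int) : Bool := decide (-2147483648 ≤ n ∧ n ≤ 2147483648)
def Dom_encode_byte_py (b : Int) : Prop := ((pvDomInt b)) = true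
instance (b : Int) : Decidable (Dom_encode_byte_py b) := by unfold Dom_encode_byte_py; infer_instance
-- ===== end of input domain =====

-- B replaces A's lowest-set-bit-clearing parity loop by counting '1' characters in the
-- already-formatted 8-bit string (objective: idiomatic; no speed claim).

-- ===== PORT A =====

-- '{:08b}'.format(b) for 0 ≤ b: binary digits left-padded with '0' to width 8 (shared by both ports,
-- as both Pythons call format).
def pvFmt08b (b : Int) : String :=
  let ds := PySem.Int.toBinChars b
  String.ofList (List.replicate (8 - ds.length) '0' ++ ds)

-- A's while loop: 'while b: par ^= 1; b &= b-1'. Fuel 16 only makes the recursion total;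
-- after 'b &= 0xFF' the loop runs at most 8 times, so the fuel is never exhausted.
def pvParLoopA : Nat → Int → Int → Int
  | 0, _, par => par
  | fuel + 1, b, par =>
    if b = 0 then par
    else pvParLoopA fuel (PySem.Int.band b (b - 1)) (PySem.Int.bxor par 1)

def encode_byte_py (b : Int) : String :=
  let b2 := PySem.Int.band b 255
  let result := pvFmt08b b2
  let par := pvParLoopA 16 b2 0
  result ++ (if par ≠ 0 then "1" else "0")

-- ===== PORT B =====
def encode_byte_py_alt (b : Int) : String :=
  let s := pvFmt08b (PySem.Int.band b 255)
  let par := PySem.Int.band (Int.ofNat (s.toList.count '1')) 1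
  s ++ (if par ≠ 0 then "1" else "0")

-- ===== PRECONDITION & SPEC =====
def Spec_encode_byte_py (b : Int) (out : String) : Prop := out = encode_byte_py_alt b
instance (b : Int) (out : String) : Decidable (Spec_encode_byte_py b out) := by unfold Spec_encode_byte_py; infer_instance

-- ===== CLAIM (what is proved, stated in full; the proofs are below) =====
def Claim_equal_encode_byte_py : Prop := ∀ (b : Int), Dom_encode_byte_py b → Spec_encode_byte_py b (encode_byte_py b)

-- ===== LEMMAS AND PROOFS =====

-- b & 255 is a byte, whatever the sign of b.
theorem pv_band255_bounds (b : Int) :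
    0 ≤ PySem.Int.band b 255 ∧ PySem.Int.band b 255 < 256 := by
  unfold PySem.Int.band
  split_ifs with h1 h2
  · have h := Nat.and_le_right (n := b.toNat) (m := (255 : Int).toNat)
    constructor
    · exact Int.natCast_nonneg _
    · omega
  · omega  -- unreachable: 0 ≤ 255
  · have h := Nat.sub_le ((255 : Int).toNat) (((255 : Int).toNat) &&& (-b - 1).toNat)
    constructor
    · exact Int.natCast_nonneg _
    · omega
  · omega  -- unreachable: 0 ≤ 255

-- the two programs agree on every byte value (kernel evaluation of all 256 cases)
set_option maxRecDepth 8192 in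
theorem pv_agree_on_bytes : ∀ k : Nat, k < 256 → encode_byte_py (↑k) = encode_byte_py_alt (↑k) := by
  decide

-- b & 255 is idempotent through a Nat below 256
theorem pv_band255_natCast (k : Nat) (hk : k < 256) : PySem.Int.band (↑k) 255 = ↑k := by
  have h : PySem.Int.band (↑k) ((255 : Nat) : Int) = ↑(k &&& 255) := PySem.Int.band_natCast k 255
  have h2 : k &&& 255 = k % 256 := Nat.and_two_pow_sub_one_eq_mod k 8
  have h3 : k % 256 = k := Nat.mod_eq_of_lt hk
  simpa [h2, h3] using h

-- ===== VERDICT (by name: the statement is the Claim_ definition above) =====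
theorem encode_byte_py_spec : Claim_equal_encode_byte_py := by
  intro b _
  unfold Spec_encode_byte_py
  obtain ⟨h0, h1⟩ := pv_band255_bounds b
  set m := PySem.Int.band b 255 with hm
  have hk : m = ((m.toNat : Nat) : Int) := (Int.toNat_of_nonneg h0).symm
  have hklt : m.toNat < 256 := by omega
  have hre : PySem.Int.band ((m.toNat : Nat) : Int) 255 = ((m.toNat : Nat) : Int) :=
    pv_band255_natCast m.toNat hklt
  have key := pv_agree_on_bytes m.toNat hklt
  simp only [encode_byte_py, encode_byte_py_alt, hre] at key
  rw [← hk] at key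
  simp only [encode_byte_py, encode_byte_py_alt, ← hm]
  exact key
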